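-- pv_equiv track=rewrite | github.com/minsongyi/minsongyi | nypc2022_2차예선/비트2.py | f
-- ===== SOURCE A (Python) =====
-- def half(a):
--     L=[]
--     h=int(len(a)/2)
--     for i in a[:h]:
--         if i==0:
--             L.append(1)
--         else:
--             L.append(0)
--     return (L+a[h:])
--
-- def f(x):
--     lenx=len(x)
--     half_l=int(lenx/2)
--     if lenx==1:
--         L=x
--     else:
--         l=x[:half_l]
--         r=x[half_l:]
--         new_l=half(l)
--         new_r=half(r)
--         L=f(new_l)+f(new_r)
--     return L
-- ===== SOURCE B (Python) =====
-- def f(x):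
--     # The positions that get negated depend only on len(x): walk the recursion
--     # structure over the length once to get a negation count per index, then
--     # apply the negations to each value in closed form in a single pass over x.
--     def counts(n):
--         if n <= 1:
--             return [0] * n
--         h = n // 2
--         cl, cr = counts(h), counts(n - h)
--         return ([c + 1 for c in cl[:h // 2]] + cl[h // 2:]
--                 + [c + 1 for c in cr[:(n - h) // 2]] + cr[(n - h) // 2:])
--
--     def negations(v, c):
--         # v after c logical negations: none leaves v untouched; otherwise
--         # the result is the bit (v != 0), toggled once more per extra negation
--         return v if c == 0 else (v != 0) ^ (c & 1)
--
--     return [negations(v, c) for v, c in zip(x, counts(len(x)))]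
-- ===== Notes on version B (the rewrite author's own statement) =====
-- stated objective: alternative
-- what changed: A repeatedly rebuilds the list, negating values at every recursion level; B recurses over the length alone to get a negation count per index and then applies the negations to each value in closed form in a single pass; Pre_ excludes only the empty list, on which A recurses without progress and raises RecursionError.
import Mathlib
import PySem

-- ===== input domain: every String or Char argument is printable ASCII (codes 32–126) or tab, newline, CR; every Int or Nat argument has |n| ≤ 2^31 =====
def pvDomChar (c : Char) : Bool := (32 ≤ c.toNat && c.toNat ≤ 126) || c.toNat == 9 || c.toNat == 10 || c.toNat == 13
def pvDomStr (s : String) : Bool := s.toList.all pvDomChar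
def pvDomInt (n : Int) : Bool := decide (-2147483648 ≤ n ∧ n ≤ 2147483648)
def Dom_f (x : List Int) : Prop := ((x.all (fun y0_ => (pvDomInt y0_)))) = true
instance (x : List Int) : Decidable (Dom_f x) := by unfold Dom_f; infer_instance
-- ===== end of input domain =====

-- B replaces A's rebuild-the-list recursion by one recursion over the LENGTH producing a
-- negation count per index, then a single pass applying the negations in closed form
-- (alternative algorithm; return values equal on Pre_).

-- ===== PORT A =====
-- half(a): negate (0↔nonzero) the first int(len(a)/2) elements.  int(len(a)/2) = ⌊len/2⌋
-- (exact: CPython float division is exact for these lengths); the append-loop over a[:h]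
-- is the map below.
def halfP (a : List Int) : List Int :=
  let h := a.length / 2
  ((a.take h).map (fun i => if i = 0 then (1 : Int) else 0)) ++ a.drop h

-- f with a fuel parameter (= x.length at the call) making the recursion total in Lean;
-- the fuel never runs out when 1 ≤ x.length (Pre_f); on [] Python A recurses forever.
def fAux : Nat → List Int → List Int
  | 0, x => x
  | fuel + 1, x =>
    if x.length = 1 then x
    else
      let h := x.length / 2
      fAux fuel (halfP (x.take h)) ++ fAux fuel (halfP (x.drop h))

def f (x : List Int) : List Int := fAux x.length x

-- ===== PORT B =====
-- counts n: negation count of each index of a block of length n (slices have nonneg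
-- bounds: take/drop is exact).
def counts (n : Nat) : List Nat :=
  if n ≤ 1 then List.replicate n 0
  else
    let h := n / 2
    let cl := counts h
    let cr := counts (n - h)
    (((cl.take (h / 2)).map (· + 1)) ++ cl.drop (h / 2)) ++
      (((cr.take ((n - h) / 2)).map (· + 1)) ++ cr.drop ((n - h) / 2))
termination_by n
decreasing_by all_goals omega

-- negations(v, c): Python's `v if c == 0 else (v != 0) ^ (c & 1)`; bool^int is int 0/1,
-- and c & 1 = c % 2 for the nonneg count c.
def flipc (v : Int) (c : Nat) : Int :=
  if c = 0 then v
  else (((if v = 0 then 0 else 1) ^^^ (c % 2) : Nat) : Int)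

-- the final list comprehension over zip(x, counts(len(x)))
def mapFlips (a : List Int) (cs : List Nat) : List Int :=
  (a.zip cs).map (fun p => flipc p.1 p.2)

def f_alt (x : List Int) : List Int := mapFlips x (counts x.length)

-- ===== PRECONDITION & SPEC =====
-- Pre_f excludes only the empty list, on which Python A recurses without progress and
-- raises RecursionError.
def Pre_f (x : List Int) : Prop := x ≠ []
instance (x : List Int) : Decidable (Pre_f x) := by unfold Pre_f; infer_instance
def pvWitness_f : List Int := [0, 5, 1, 0]

def Spec_f (x : List Int) (out : List Int) : Prop := out = f_alt x
instance (x : List Int) (out : List Int) : Decidable (Spec_f x out) := by unfold Spec_f; infer_instance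

-- ===== CLAIM (what is proved, stated in full; the proofs are below) =====
def Claim_equal_f : Prop := ∀ (x : List Int), Dom_f x → Pre_f x → Spec_f x (f x)

-- ===== LEMMAS AND PROOFS =====

theorem halfP_length (a : List Int) : (halfP a).length = a.length := by
  simp [halfP]; omega

theorem counts_length (n : Nat) : (counts n).length = n := by
  induction n using Nat.strong_induction_on with
  | _ n ih =>
    by_cases hn : n ≤ 1
    · rw [counts]; simp [hn]
    · rw [counts, if_neg hn]
      have i1 := ih (n / 2) (by omega)
      have i2 := ih (n - n / 2) (by omega)
      simp only [List.length_append, List.length_map, List.length_take, List.length_drop, i1, i2]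
      omega

theorem flipc_flip (v : Int) (c : Nat) :
    flipc (if v = 0 then (1 : Int) else 0) c = flipc v (c + 1) := by
  by_cases hv : v = 0 <;>
    rcases Nat.mod_two_eq_zero_or_one c with h | h <;>
      by_cases hc : c = 0 <;>
        simp [flipc, hv, h, hc, Nat.add_mod, -Nat.add_mod_right]

theorem mapFlips_append (u v : List Int) (c1 c2 : List Nat) (h : u.length = c1.length) :
    mapFlips (u ++ v) (c1 ++ c2) = mapFlips u c1 ++ mapFlips v c2 := by
  simp [mapFlips, List.zip_append h]

theorem mapFlips_flip (u : List Int) (cs : List Nat) :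
    mapFlips (u.map (fun i => if i = 0 then (1 : Int) else 0)) cs
      = mapFlips u (cs.map (· + 1)) := by
  induction u generalizing cs with
  | nil => simp [mapFlips]
  | cons a u ih =>
      cases cs with
      | nil => simp [mapFlips]
      | cons c cs => simp [mapFlips, flipc_flip] at ih ⊢; exact ih cs

-- negating the first ⌊m/2⌋ values = adding 1 to the first ⌊m/2⌋ counts
theorem mapFlips_halfP (a : List Int) (m : Nat) (hm : a.length = m) :
    mapFlips (halfP a) (counts m)
      = mapFlips a
          (((counts m).take (m / 2)).map (· + 1) ++ (counts m).drop (m / 2)) := by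
  have hC : (counts m).length = m := counts_length m
  have hhalf : halfP a
      = (a.take (m / 2)).map (fun i => if i = 0 then (1 : Int) else 0) ++ a.drop (m / 2) := by
    simp [halfP, hm]
  conv_lhs => rw [hhalf,
    show counts m = (counts m).take (m / 2) ++ (counts m).drop (m / 2) from
      (List.take_append_drop _ _).symm]
  rw [mapFlips_append _ _ _ _ (by simp [hm, hC]), mapFlips_flip]
  conv_rhs => rw [show a = a.take (m / 2) ++ a.drop (m / 2) from (List.take_append_drop _ _).symm]
  rw [mapFlips_append _ _ _ _ (by simp [hm, hC])]

theorem fAux_eq (fuel : Nat) : ∀ x : List Int, 1 ≤ x.length → x.length ≤ fuel →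
    fAux fuel x = mapFlips x (counts x.length) := by
  induction fuel with
  | zero => intro x h1 h2; omega
  | succ fuel ih =>
      intro x h1 h2
      by_cases hx : x.length = 1
      · obtain ⟨a, rfl⟩ : ∃ a, x = [a] := by
          cases x with
          | nil => simp at hx
          | cons a t => cases t with
            | nil => exact ⟨a, rfl⟩
            | cons b t => simp at hx
        simp [fAux, counts, mapFlips, flipc]
      · have hn2 : 2 ≤ x.length := by omega
        simp only [fAux, hx, if_neg, not_false_iff]
        set n := x.length with hn
        set h := n / 2 with hh
        have hlt : (x.take h).length = h := by simp [← hn]; omega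
        have hrt : (x.drop h).length = n - h := by simp [← hn]
        have ihl := ih (halfP (x.take h)) (by rw [halfP_length, hlt]; omega)
          (by rw [halfP_length, hlt]; omega)
        have ihr := ih (halfP (x.drop h)) (by rw [halfP_length, hrt]; omega)
          (by rw [halfP_length, hrt]; omega)
        rw [ihl, ihr, halfP_length, halfP_length, hlt, hrt,
          mapFlips_halfP (x.take h) h hlt, mapFlips_halfP (x.drop h) (n - h) hrt]
        have hcn : counts n =
            (((counts h).take (h / 2)).map (· + 1) ++ (counts h).drop (h / 2)) ++
              (((counts (n - h)).take ((n - h) / 2)).map (· + 1) ++ (counts (n - h)).drop ((n - h) / 2)) := by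
          conv_lhs => rw [counts]
          simp only [← hh]
          rw [if_neg (by omega)]
        rw [hcn, ← mapFlips_append]
        · conv_rhs => rw [show x = x.take h ++ x.drop h by simp]
        · rw [hlt]
          have := counts_length h
          simp [this]; omega

-- ===== VERDICT (by name: the statement is the Claim_ definition above) =====
theorem f_spec : Claim_equal_f := by
  intro x _ hpre
  have h1 : 1 ≤ x.length := by
    cases x with
    | nil => exact absurd rfl hpre
    | cons a t => simp
  unfold Spec_f f f_alt
  exact fAux_eq x.length x h1 le_rfl
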